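-- pv_equiv track=rewrite | github.com/davidar/oeisdata | verified/prog/Python/A010/A010551.py | O
-- ===== SOURCE A (Python) =====
-- def O(f):
--     c = 1
--     while len(f) > 1:
--         f.sort()
--         m = abs(f[0] - f[1])
--         c *= m
--         f[0] = m
--         f.pop(1)
--     return c
-- ===== SOURCE B (Python) =====
-- def _merge(h1, h2):
--     if h1 is None:
--         return h2
--     if h2 is None:
--         return h1
--     if h2[0] < h1[0]:
--         h1, h2 = h2, h1
--     # skew-heap merge: keep the smaller root, swap its children
--     return (h1[0], _merge(h1[2], h2), h1[1])
--
--
-- def O(f):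
--     h = None
--     for x in f:
--         h = _merge(h, (x, None, None))
--     c = 1
--     n = len(f)
--     while n > 1:
--         a = h[0]
--         h = _merge(h[1], h[2])
--         b = h[0]
--         h = _merge(h[1], h[2])
--         m = b - a
--         c *= m
--         h = _merge(h, (m, None, None))
--         n -= 1
--     return c
-- ===== Notes on version B (the rewrite author's own statement) =====
-- stated objective: faster
-- what changed: B replaces A's re-sort-the-whole-list-every-iteration loop by a skew heap (pairing of recursive merges): pop the two smallest, push their difference, accumulate the product.
import Mathlib
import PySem

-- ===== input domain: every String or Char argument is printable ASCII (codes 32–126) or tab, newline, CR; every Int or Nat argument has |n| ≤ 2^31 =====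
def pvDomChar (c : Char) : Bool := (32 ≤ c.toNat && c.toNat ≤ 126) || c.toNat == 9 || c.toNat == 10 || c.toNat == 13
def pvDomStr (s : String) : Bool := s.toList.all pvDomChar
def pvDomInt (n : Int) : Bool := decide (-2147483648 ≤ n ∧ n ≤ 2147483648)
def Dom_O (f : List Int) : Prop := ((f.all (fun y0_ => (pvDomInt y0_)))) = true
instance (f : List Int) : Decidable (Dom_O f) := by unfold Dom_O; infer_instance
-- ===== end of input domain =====

-- B replaces A's re-sort-every-iteration loop by a skew heap: pop the two smallest,
-- push their difference, accumulate the product (objective: faster).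
-- A mutates its argument in place (sort/pop); B does not — the equivalence proved here
-- is about the RETURN value only.

-- ===== PORT A =====
-- while len(f) > 1: f.sort(); m = abs(f[0]-f[1]); c *= m; f[0] = m; f.pop(1)
def OA_loop (f : List Int) (c : Int) : Int :=
  match h : PySem.List.sorted f (fun x => x) false with
  | a :: b :: t => OA_loop (|a - b| :: t) (c * |a - b|)
  | _ => c
termination_by f.length
decreasing_by
  have hl := PySem.List.length_sorted (xs := f) (key := fun x : Int => x) (rev := false)
  rw [h] at hl
  simp at hl ⊢
  omega

def O (f : List Int) : Int := OA_loop f 1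

-- ===== PORT B =====
-- Python's nested triples (v, left, right) / None become an inductive binary tree.
inductive Heap where
  | nil : Heap
  | node : Int → Heap → Heap → Heap
deriving DecidableEq, Repr

def heapSize : Heap → Nat
  | .nil => 0
  | .node _ l r => 1 + heapSize l + heapSize r

-- _merge(h1, h2): skew-heap merge — keep the smaller root, swap its children
def heapMerge : Heap → Heap → Heap
  | .nil, h2 => h2
  | h1, .nil => h1
  | .node v1 l1 r1, .node v2 l2 r2 =>
      if v2 < v1 then Heap.node v2 (heapMerge r2 (Heap.node v1 l1 r1)) l2
      else Heap.node v1 (heapMerge r1 (Heap.node v2 l2 r2)) l1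
termination_by h1 h2 => heapSize h1 + heapSize h2
decreasing_by all_goals (simp [heapSize]; try omega)

-- while n > 1: a = pop(); b = pop(); m = b - a; c *= m; push(m); n -= 1
-- (the .nil match arms are unreachable: while n > 1 the heap holds n ≥ 2 elements)
def OB_loop (h : Heap) (n : Nat) (c : Int) : Int :=
  if 1 < n then
    match h with
    | .node a l r =>
      match heapMerge l r with
      | .node b l2 r2 =>
          OB_loop (heapMerge (heapMerge l2 r2) (Heap.node (b - a) Heap.nil Heap.nil))
            (n - 1) (c * (b - a))
      | .nil => c
    | .nil => c
  else c
termination_by n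

def O_alt (f : List Int) : Int :=
  OB_loop (f.foldl (fun h x => heapMerge h (Heap.node x Heap.nil Heap.nil)) Heap.nil)
    f.length 1

-- ===== PRECONDITION & SPEC =====
def Spec_O (f : List Int) (out : Int) : Prop := out = O_alt f
instance (f : List Int) (out : Int) : Decidable (Spec_O f out) := by unfold Spec_O; infer_instance

-- ===== CLAIM (what is proved, stated in full; the proofs are below) =====
def Claim_equal_O : Prop := ∀ (f : List Int), Dom_O f → Spec_O f (O f)

-- ===== LEMMAS AND PROOFS =====

def heapToList : Heap → List Int
  | .nil => []
  | .node v l r => v :: ((heapToList l) ++ (heapToList r))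

theorem merge_count (h1 h2 : Heap) (x : Int) :
    (heapToList (heapMerge h1 h2)).count x = (heapToList h1).count x + (heapToList h2).count x := by
  fun_induction heapMerge h1 h2 with
  | case1 => simp [heapToList]
  | case2 => simp [heapToList]
  | case3 v1 l1 r1 v2 l2 r2 hlt ih =>
      simp [heapToList, List.count_append, List.count_cons] at ih ⊢
      omega
  | case4 v1 l1 r1 v2 l2 r2 hlt ih =>
      simp [heapToList, List.count_append, List.count_cons] at ih ⊢
      omega

theorem merge_perm (h1 h2 : Heap) :
    (heapToList (heapMerge h1 h2)).Perm ((heapToList h1) ++ (heapToList h2)) := by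
  rw [List.perm_iff_count]
  intro x
  rw [List.count_append]
  exact merge_count h1 h2 x

theorem mem_merge {x : Int} {h1 h2 : Heap} :
    x ∈ heapToList (heapMerge h1 h2) ↔ x ∈ (heapToList h1) ∨ x ∈ (heapToList h2) := by
  rw [(merge_perm h1 h2).mem_iff]; simp

inductive HeapInv : Heap → Prop where
  | nil : HeapInv Heap.nil
  | node {v : Int} {l r : Heap} : HeapInv l → HeapInv r →
      (∀ x ∈ (heapToList l), v ≤ x) → (∀ x ∈ (heapToList r), v ≤ x) → HeapInv (Heap.node v l r)

theorem root_le {v : Int} {l r : Heap} (h : HeapInv (Heap.node v l r)) :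
    ∀ x ∈ heapToList (Heap.node v l r), v ≤ x := by
  cases h with
  | node hl hr bl br =>
    intro x hx
    simp [heapToList] at hx
    rcases hx with rfl | hx | hx
    · exact le_refl x
    · exact bl x hx
    · exact br x hx

theorem merge_inv {h1 h2 : Heap} (i1 : HeapInv h1) (i2 : HeapInv h2) :
    HeapInv (heapMerge h1 h2) := by
  fun_induction heapMerge h1 h2 with
  | case1 => exact i2
  | case2 => exact i1
  | case3 v1 l1 r1 v2 l2 r2 hlt ih =>
      cases i1 with
      | node il1 ir1 bl1 br1 =>
        cases i2 with
        | node il2 ir2 bl2 br2 =>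
          refine HeapInv.node (ih ir2 (HeapInv.node il1 ir1 bl1 br1)) il2 ?_ bl2
          intro x hx
          rcases mem_merge.mp hx with hx | hx
          · exact br2 x hx
          · exact le_trans (le_of_lt hlt)
              (root_le (HeapInv.node il1 ir1 bl1 br1) x hx)
  | case4 v1 l1 r1 v2 l2 r2 hlt ih =>
      cases i1 with
      | node il1 ir1 bl1 br1 =>
        cases i2 with
        | node il2 ir2 bl2 br2 =>
          refine HeapInv.node (ih ir1 (HeapInv.node il2 ir2 bl2 br2)) il1 ?_ bl1
          intro x hx
          rcases mem_merge.mp hx with hx | hx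
          · exact br1 x hx
          · exact le_trans (not_lt.mp hlt)
              (root_le (HeapInv.node il2 ir2 bl2 br2) x hx)

theorem build_perm (f : List Int) (h : Heap) :
    (heapToList (f.foldl (fun h x => heapMerge h (Heap.node x Heap.nil Heap.nil)) h)).Perm
      ((heapToList h) ++ f) := by
  induction f generalizing h with
  | nil => simp
  | cons x xs ih =>
      simp only [List.foldl_cons]
      refine (ih _).trans ?_
      refine ((merge_perm h (Heap.node x Heap.nil Heap.nil)).append_right xs).trans ?_
      simp [heapToList]

theorem build_inv (f : List Int) (h : Heap) (hi : HeapInv h) :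
    HeapInv (f.foldl (fun h x => heapMerge h (Heap.node x Heap.nil Heap.nil)) h) := by
  induction f generalizing h with
  | nil => exact hi
  | cons x xs ih =>
      exact ih _ (merge_inv hi (HeapInv.node HeapInv.nil HeapInv.nil (by simp [heapToList])
        (by simp [heapToList])))

theorem main_lemma : ∀ (n : Nat) (h : Heap) (f : List Int) (c : Int),
    HeapInv h → (heapToList h).Perm f → f.length = n → OB_loop h n c = OA_loop f c := by
  intro n
  induction n using Nat.strong_induction_on with
  | _ n ih =>
    intro h f c hinv hperm hlen
    rw [OB_loop.eq_def]
    by_cases hn : 1 < n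
    · -- at least two elements
      simp only [hn, if_true]
      have hls := PySem.List.length_sorted (xs := f) (key := fun x : Int => x) (rev := false)
      have hpw := PySem.List.sorted_pairwise (xs := f) (key := fun x : Int => x)
      have hsp := PySem.List.sorted_perm (xs := f) (key := fun x : Int => x) (rev := false)
      cases hs : PySem.List.sorted f (fun x => x) false with
      | nil => rw [hs] at hls; simp at hls; omega
      | cons a t' =>
        cases t' with
        | nil => rw [hs] at hls; simp at hls; omega
        | cons b t =>
          rw [hs] at hls hpw hsp
          have hmin : ∀ y ∈ f, a ≤ y :=
            PySem.List.key_head_sorted_le (xs := f) (key := fun x : Int => x) hs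
          rw [List.pairwise_cons] at hpw
          have hab : a ≤ b := hpw.1 b (by simp)
          have hbmin : ∀ x ∈ b :: t, b ≤ x := by
            intro x hx
            rcases List.mem_cons.mp hx with rfl | hx
            · exact le_refl x
            · exact (List.pairwise_cons.mp hpw.2).1 x hx
          -- the heap is nonempty
          cases h with
          | nil =>
            have := hperm.length_eq
            simp [heapToList] at this
            omega
          | node v l r =>
            -- v = a
            have hva : v = a := by
              have h1 : a ≤ v := hmin v (hperm.mem_iff.mp (by simp [heapToList]))
              have h2 : v ≤ a := root_le hinv a
                (hperm.mem_iff.mpr (hsp.mem_iff.mp (by simp)))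
              omega
            subst hva
            cases hinv with
            | node il ir bl br =>
              have hrest : ((heapToList l) ++ (heapToList r)).Perm (b :: t) := by
                have h1 : (v :: ((heapToList l) ++ (heapToList r))).Perm (v :: b :: t) := by
                  simpa [heapToList] using hperm.trans hsp.symm
                exact h1.cons_inv
              have hm2 : (heapToList (heapMerge l r)).Perm (b :: t) :=
                (merge_perm l r).trans hrest
              have hm2inv : HeapInv (heapMerge l r) := merge_inv il ir
              cases hm : heapMerge l r with
              | nil =>
                rw [hm] at hm2
                have := hm2.length_eq
                simp [heapToList] at this
              | node v2 l2 r2 =>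
                rw [hm] at hm2 hm2inv
                have hvb : v2 = b := by
                  have h1 : b ≤ v2 := hbmin v2 (hm2.mem_iff.mp (by simp [heapToList]))
                  have h2 : v2 ≤ b := root_le hm2inv b (hm2.mem_iff.mpr (by simp))
                  omega
                subst hvb
                cases hm2inv with
                | node il2 ir2 bl2 br2 =>
                  have hrest2 : ((heapToList l2) ++ (heapToList r2)).Perm t := by
                    have : (v2 :: ((heapToList l2) ++ (heapToList r2))).Perm (v2 :: t) := hm2
                    exact this.cons_inv
                  -- new heap after pushing m = b - a
                  have hperm3 :
                      (heapToList (heapMerge (heapMerge l2 r2)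
                        (Heap.node (v2 - v) Heap.nil Heap.nil))).Perm
                        ((v2 - v) :: t) := by
                    refine (merge_perm _ _).trans ?_
                    have e : heapToList (Heap.node (v2 - v) Heap.nil Heap.nil) = [v2 - v] := rfl
                    rw [e]
                    exact (((merge_perm l2 r2).trans hrest2).append_right [v2 - v]).trans
                      (List.perm_append_singleton _ _)
                  have hinv3 : HeapInv (heapMerge (heapMerge l2 r2)
                      (Heap.node (v2 - v) Heap.nil Heap.nil)) :=
                    merge_inv (merge_inv il2 ir2)
                      (HeapInv.node HeapInv.nil HeapInv.nil (by simp [heapToList]) (by simp [heapToList]))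
                  have hlen3 : ((v2 - v) :: t).length = n - 1 := by
                    simp at hls ⊢
                    omega
                  have habs : |v - v2| = v2 - v := by
                    rw [abs_sub_comm]; exact abs_of_nonneg (by omega)
                  simp only [hm]
                  rw [ih (n - 1) (by omega) _ _ _ hinv3 hperm3 hlen3]
                  conv_rhs => rw [OA_loop]
                  split
                  · rename_i a' b' t' heq
                    rw [hs] at heq
                    injection heq with e1 e2
                    injection e2 with e2 e3
                    subst e1; subst e2; subst e3
                    rw [habs]
                  · rename_i hne
                    exact absurd hs (hne v v2 t)
    · -- n ≤ 1: at most one element, A's loop returns c immediately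
      simp only [hn, if_false]
      have hls := PySem.List.length_sorted (xs := f) (key := fun x : Int => x) (rev := false)
      rw [OA_loop]
      split
      · rename_i a b t heq
        rw [heq] at hls
        have := hperm.length_eq
        simp at hls
        omega
      · rfl

-- ===== VERDICT (by name: the statement is the Claim_ definition above) =====
theorem O_spec : Claim_equal_O := by
  intro f _
  unfold Spec_O O O_alt
  exact (main_lemma f.length _ f 1
    (build_inv f Heap.nil HeapInv.nil)
    (by simpa using build_perm f Heap.nil) rfl).symm
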